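-- pv_equiv track=rewrite | github.com/MrBrantCode/unitest_baseline | mut_generate/mist_train_taco/taco_7688/solution.py | find_minimum_length_of_s
-- ===== SOURCE A (Python) =====
-- def find_minimum_length_of_s(a: str, b: str, c: str) -> int:
--     def F(a, b):
--         A = len(a)
--         r = [all([len(set([a[i + j], b[j], '?'])) < 3 for j in range(min(A - i, len(b)))]) for i in range(A)]
--         return r + [1]
--
--     def Z(X):
--         (i, j, k) = X
--         (U, V, W) = (M[i][j], M[j][k], M[i][k])
--         (A, B, C) = map(len, [S[i] for i in X])
--         q = A + B + C
--         for l in range(A + 1):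
--             if U[l]:
--                 for r in range(l, A + B + 1):
--                     if (B < r - l or V[r - l]) * W[min(A, r)]:
--                         q = min(q, max(A, l + B, r + C))
--         return q
--
--     S = [a, b, c]
--     T = range(3)
--     M = [[F(S[i], S[j]) for j in T] for i in T]
--     from itertools import permutations
--     return min([Z(i) for i in permutations(T)])
-- ===== SOURCE B (Python) =====
-- def find_minimum_length_of_s(a: str, b: str, c: str) -> int:
--     def ok(x, y):
--         return x == y or x == '?' or y == '?'
--
--     def fits(s, t, d):
--         # can t be placed over s at offset d (d >= 0)?
--         return all(ok(s[d + j], t[j]) for j in range(min(len(s) - d, len(t))))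
--
--     def merge(s, t, d):
--         # the combined pattern of s with t overlaid at offset d (assumes fits(s, t, d))
--         n = max(len(s), d + len(t))
--         return ''.join(
--             s[p] if p < len(s) and s[p] != '?' else
--             (t[p - d] if d <= p < d + len(t) else '?')
--             for p in range(n))
--
--     def best(x, y, z):
--         q = len(x) + len(y) + len(z)
--         for l in range(len(x) + 1):
--             if fits(x, y, l):
--                 m = merge(x, y, l)
--                 for r in range(l, len(m) + 1):
--                     if fits(m, z, r):
--                         q = min(q, max(len(m), r + len(z)))
--                         break
--         return q
--
--     return min(best(x, y, z) for (x, y, z) in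
--                [(a, b, c), (a, c, b), (b, a, c), (b, c, a), (c, a, b), (c, b, a)])
-- ===== Notes on version B (the rewrite author's own statement) =====
-- stated objective: alternative
-- what changed: A precomputes a 3x3 matrix of pairwise overlap tables and, per permutation, scans all (l, r) pairs testing a product of three table entries; B instead, per permutation and left offset l, explicitly merges the first two strings into one combined pattern string and searches for the first offset at which the third string fits over that merged pattern (valid since the candidate length is monotone in the offset).
import Mathlib
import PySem

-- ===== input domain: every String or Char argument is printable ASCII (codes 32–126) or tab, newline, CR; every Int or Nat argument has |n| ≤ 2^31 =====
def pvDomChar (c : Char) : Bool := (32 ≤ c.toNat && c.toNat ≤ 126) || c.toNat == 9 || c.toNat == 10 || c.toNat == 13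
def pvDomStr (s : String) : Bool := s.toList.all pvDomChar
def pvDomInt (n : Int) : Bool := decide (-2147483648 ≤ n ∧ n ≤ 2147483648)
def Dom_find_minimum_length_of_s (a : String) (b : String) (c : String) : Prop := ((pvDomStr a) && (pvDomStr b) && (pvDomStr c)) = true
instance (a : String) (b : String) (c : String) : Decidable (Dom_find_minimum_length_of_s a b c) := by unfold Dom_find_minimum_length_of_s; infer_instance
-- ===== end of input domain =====

-- B is a different algorithm: instead of A's three precomputed pairwise overlap tables and a
-- double (l, r) scan testing a product of table entries, B merges the first two strings into an
-- explicit combined pattern string and then searches the first offset at which the third string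
-- fits over that merged pattern; objective: alternative (no speed claim).

-- ===== PORT A =====
-- len(set([x, y, '?'])) < 3
def pvSetCond (x y : Char) : Bool := (PySem.Set.ofList [x, y, '?']).length < 3

-- F(a, b): r + [1]; bools only (the sentinel 1 is only ever used for truthiness) so [1] is [true]
def pvF (a b : List Char) : List Bool :=
  ((PySem.List.pyRange 0 (a.length : Int) 1).map (fun i =>
    (((PySem.List.pyRange 0 (min ((a.length : Int) - i) (b.length : Int)) 1).map (fun j =>
        pvSetCond (PySem.List.pyGetD a (i + j) ' ') (PySem.List.pyGetD b j ' '))).all (fun x => x))))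
  ++ [true]

-- Z(X); list indices i, j, k are the literals 0/1/2 from permutations(range(3)), so Nat getD is exact;
-- the Python '(… or …) * …' product of truthinesses is && of the Bools
def pvZ (S : List (List Char)) (M : List (List (List Bool))) (X : Nat × Nat × Nat) : Int :=
  let U := (M.getD X.1 []).getD X.2.1 []
  let V := (M.getD X.2.1 []).getD X.2.2 []
  let W := (M.getD X.1 []).getD X.2.2 []
  let A : Int := (S.getD X.1 []).length
  let B : Int := (S.getD X.2.1 []).length
  let C : Int := (S.getD X.2.2 []).length
  (PySem.List.pyRange 0 (A + 1) 1).foldl (fun q l =>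
    if PySem.List.pyGetD U l false then
      (PySem.List.pyRange l (A + B + 1) 1).foldl (fun q r =>
        if (decide (B < r - l) || PySem.List.pyGetD V (r - l) false)
            && PySem.List.pyGetD W (min A r) false then
          min q (max (max A (l + B)) (r + C))
        else q) q
    else q) (A + B + C)

def find_minimum_length_of_s (a : String) (b : String) (c : String) : Int :=
  let S := [a.toList, b.toList, c.toList]
  let M := (List.range 3).map (fun i => (List.range 3).map (fun j => pvF (S.getD i []) (S.getD j [])))
  match PySem.List.min?
      ([(0,1,2),(0,2,1),(1,0,2),(1,2,0),(2,0,1),(2,1,0)].map (fun X => pvZ S M X)) (fun v => v) with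
  | some v => v
  | none => 0

-- ===== PORT B =====
def pvOk (x y : Char) : Bool := x == y || x == '?' || y == '?'

-- fits(s, t, d) = all(ok(s[d+j], t[j]) for j in range(min(len(s)-d, len(t))))
def pvFits (s t : List Char) (d : Int) : Bool :=
  (PySem.List.pyRange 0 (min ((s.length : Int) - d) (t.length : Int)) 1).all (fun j =>
    pvOk (PySem.List.pyGetD s (d + j) ' ') (PySem.List.pyGetD t j ' '))

-- merge(s, t, d): the combined pattern, one character per position p of range(max(len(s), d+len(t)))
def pvMerge (s t : List Char) (d : Int) : List Char :=
  (PySem.List.pyRange 0 (max (s.length : Int) (d + (t.length : Int))) 1).map (fun p =>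
    if decide (p < (s.length : Int)) && (PySem.List.pyGetD s p ' ' != '?') then
      PySem.List.pyGetD s p ' '
    else if decide (d ≤ p) && decide (p < d + (t.length : Int)) then
      PySem.List.pyGetD t (p - d) ' '
    else '?')

-- best(x, y, z): for/break ported as find? on the same range
def pvBest (x y z : List Char) : Int :=
  (PySem.List.pyRange 0 ((x.length : Int) + 1) 1).foldl (fun q l =>
    if pvFits x y l then
      let m := pvMerge x y l
      match (PySem.List.pyRange l ((m.length : Int) + 1) 1).find? (fun r => pvFits m z r) with
      | some r => min q (max (m.length : Int) (r + (z.length : Int)))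
      | none => q
    else q) ((x.length : Int) + (y.length : Int) + (z.length : Int))

def find_minimum_length_of_s_alt (a : String) (b : String) (c : String) : Int :=
  let x := a.toList
  let y := b.toList
  let z := c.toList
  min (min (min (min (min (pvBest x y z) (pvBest x z y)) (pvBest y x z))
    (pvBest y z x)) (pvBest z x y)) (pvBest z y x)

-- ===== PRECONDITION & SPEC =====
def Spec_find_minimum_length_of_s (a : String) (b : String) (c : String) (out : Int) : Prop := out = find_minimum_length_of_s_alt a b c
instance (a : String) (b : String) (c : String) (out : Int) : Decidable (Spec_find_minimum_length_of_s a b c out) := by unfold Spec_find_minimum_length_of_s; infer_instance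

-- ===== CLAIM (what is proved, stated in full; the proofs are below) =====
def Claim_equal_find_minimum_length_of_s : Prop := ∀ (a : String) (b : String) (c : String), Dom_find_minimum_length_of_s a b c → Spec_find_minimum_length_of_s a b c (find_minimum_length_of_s a b c)

-- ===== LEMMAS AND PROOFS =====

-- the two character tests agree
theorem pvSetCond_eq_pvOk (x y : Char) : pvSetCond x y = pvOk x y := by
  unfold pvSetCond pvOk
  rw [PySem.Set.ofList_eq_foldl]
  simp only [List.foldl]
  by_cases hxy : y = x <;> by_cases hxq : x = '?' <;> by_cases hyq : y = '?' <;>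
    simp [PySem.Set.add, PySem.Set.contains, hxy, hxq, hyq] <;>
    split_ifs with h <;> simp_all <;>
    first
      | exact fun hh => hxy hh.symm
      | (rcases h with h | h
         · exact absurd h.symm hxq
         · exact absurd h.symm hyq)

-- pvFits as a ∀-statement
theorem fits_iff (s t : List Char) (d : Int) :
    pvFits s t d = true ↔ ∀ j : Int, 0 ≤ j → j < min ((s.length : Int) - d) (t.length : Int) →
      pvOk (PySem.List.pyGetD s (d + j) ' ') (PySem.List.pyGetD t j ' ') = true := by
  simp only [pvFits, List.all_eq_true, PySem.List.mem_pyRange_one]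
  constructor
  · intro h j h0 h1; exact h j ⟨h0, h1⟩
  · intro h j hj; exact h j hj.1 hj.2

-- a table entry of A is B's fits test
theorem table_eq (s t : List Char) (i : Int) (h0 : 0 ≤ i) (h1 : i ≤ (s.length : Int)) :
    PySem.List.pyGetD (pvF s t) i false = pvFits s t i := by
  have hlenmap : ((PySem.List.pyRange 0 (s.length : Int) 1).map (fun i =>
      (((PySem.List.pyRange 0 (min ((s.length : Int) - i) (t.length : Int)) 1).map (fun j =>
          pvSetCond (PySem.List.pyGetD s (i + j) ' ') (PySem.List.pyGetD t j ' '))).all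
        (fun x => x)))).length = s.length := by
    simp [PySem.List.length_pyRange_one]
  rcases lt_or_eq_of_le h1 with hi | hi
  · -- i < len(s): the comprehension entry
    have hnat : i.toNat < s.length := by omega
    have hcast : ((i.toNat : Nat) : Int) = i := Int.toNat_of_nonneg h0
    rw [pvF, PySem.List.pyGetD_eq_getElem _ _ h0
      (by simp; omega)]
    rw [List.getElem_append_left (by omega), List.getElem_map,
      PySem.List.getElem_pyRange_one]
    simp only [List.all_map, zero_add, hcast, pvSetCond_eq_pvOk]
    rfl
  · -- i = len(s): the sentinel entry is true, and fits at offset len(s) is vacuously true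
    subst hi
    rw [pvF, PySem.List.pyGetD_eq_getElem _ _ h0 (by simp)]
    rw [List.getElem_append_right (by omega)]
    simp only [hlenmap, Int.toNat_natCast, Nat.sub_self, List.getElem_singleton]
    rw [pvFits, PySem.List.pyRange_one_eq_nil (by omega)]
    rfl

-- length of the merged pattern
theorem merge_len (s t : List Char) (d : Int) :
    ((pvMerge s t d).length : Int) = max (s.length : Int) (d + (t.length : Int)) := by
  simp only [pvMerge, List.length_map, PySem.List.length_pyRange_one]
  omega

-- a character of the merged pattern
theorem merge_getD (s t : List Char) (d i : Int) (h0 : 0 ≤ i)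
    (hi : i < max (s.length : Int) (d + (t.length : Int))) :
    PySem.List.pyGetD (pvMerge s t d) i ' ' =
      if decide (i < (s.length : Int)) && (PySem.List.pyGetD s i ' ' != '?') then
        PySem.List.pyGetD s i ' '
      else if decide (d ≤ i) && decide (i < d + (t.length : Int)) then
        PySem.List.pyGetD t (i - d) ' '
      else '?' := by
  exact PySem.List.pyGetD_map_pyRange_of_nonneg _ _ _ _ h0 hi

-- the '?'-test: a wildcard matches anything
theorem ok_q (ch : Char) : pvOk '?' ch = true := by simp [pvOk]

-- if a and b are compatible and a is not the wildcard, whatever matches a matches b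
theorem ok_dominate (a b ch : Char) (hab : pvOk a b = true) (ha : a ≠ '?')
    (h : pvOk a ch = true) : pvOk b ch = true := by
  simp only [pvOk, Bool.or_eq_true, beq_iff_eq] at *
  rcases hab with (h1 | h1) | h1
  · subst h1; exact h
  · exact absurd h1 ha
  · subst h1; left; right; rfl

-- matching a character of the merged pattern = matching both contributing characters
theorem ok_merge_char (x y : List Char) (l p : Int) (ch : Char)
    (h0 : 0 ≤ l) (hfit : pvFits x y l = true) (hp0 : 0 ≤ p)
    (hp : p < max (x.length : Int) (l + (y.length : Int))) :
    (pvOk (PySem.List.pyGetD (pvMerge x y l) p ' ') ch = true) ↔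
      ((p < (x.length : Int) → pvOk (PySem.List.pyGetD x p ' ') ch = true) ∧
       (l ≤ p → p < l + (y.length : Int) → pvOk (PySem.List.pyGetD y (p - l) ' ') ch = true)) := by
  have hcomp : l ≤ p → p < (x.length : Int) → p < l + (y.length : Int) →
      pvOk (PySem.List.pyGetD x p ' ') (PySem.List.pyGetD y (p - l) ' ') = true := by
    intro hlp hpx hpy
    have h := (fits_iff x y l).mp hfit (p - l) (by omega) (by omega)
    simpa [show l + (p - l) = p from by ring] using h
  rw [merge_getD x y l p hp0 hp]
  by_cases hx : (decide (p < (x.length : Int)) && (PySem.List.pyGetD x p ' ' != '?')) = true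
  · -- the merged char is x's char (a real one)
    rw [if_pos hx]
    have h1 : p < (x.length : Int) := by
      have := hx; simp only [Bool.and_eq_true, decide_eq_true_eq] at this; exact this.1
    have hq : PySem.List.pyGetD x p ' ' ≠ '?' := by
      have := hx; simp only [Bool.and_eq_true, bne_iff_ne] at this; exact this.2
    constructor
    · intro h
      exact ⟨fun _ => h, fun h2l h2r => ok_dominate _ _ _ (hcomp h2l h1 h2r) hq h⟩
    · intro h; exact h.1 h1
  · rw [if_neg hx]
    have hxor : ¬ (p < (x.length : Int)) ∨ PySem.List.pyGetD x p ' ' = '?' := by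
      by_contra hc
      push_neg at hc
      exact hx (by simp [hc.1, bne_iff_ne, hc.2])
    by_cases hy : (decide (l ≤ p) && decide (p < l + (y.length : Int))) = true
    · -- the merged char is y's char
      rw [if_pos hy]
      have h2l : l ≤ p := by
        have := hy; simp only [Bool.and_eq_true, decide_eq_true_eq] at this; exact this.1
      have h2r : p < l + (y.length : Int) := by
        have := hy; simp only [Bool.and_eq_true, decide_eq_true_eq] at this; exact this.2
      constructor
      · intro h
        refine ⟨fun hpx => ?_, fun _ _ => h⟩
        rcases hxor with hc | hc
        · exact absurd hpx hc
        · rw [hc]; exact ok_q ch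
      · intro h; exact h.2 h2l h2r
    · -- the merged char is the wildcard
      rw [if_neg hy]
      have hyor : ¬ l ≤ p ∨ ¬ p < l + (y.length : Int) := by
        by_contra hc
        push_neg at hc
        exact hy (by simp [hc.1, hc.2])
      constructor
      · intro _
        refine ⟨fun hpx => ?_, fun h2l h2r => ?_⟩
        · rcases hxor with hc | hc
          · exact absurd hpx hc
          · rw [hc]; exact ok_q ch
        · rcases hyor with hc | hc
          · exact absurd h2l hc
          · exact absurd h2r hc
      · intro _; exact ok_q ch

-- KEY: the third string fits over the merged pattern iff A's two table conditions hold
theorem fits_merge (x y z : List Char) (l r : Int)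
    (h0 : 0 ≤ l) (hfit : pvFits x y l = true) (hlr : l ≤ r) :
    pvFits (pvMerge x y l) z r
      = ((decide ((y.length : Int) < r - l) || pvFits y z (r - l))
          && pvFits x z (min (x.length : Int) r)) := by
  have key : ∀ a b : Bool, (a = true ↔ b = true) → a = b := by decide
  apply key
  rw [Bool.and_eq_true, Bool.or_eq_true, decide_eq_true_eq]
  rw [fits_iff (pvMerge x y l) z r, fits_iff y z (r - l), fits_iff x z (min (x.length : Int) r)]
  simp only [merge_len]
  constructor
  · intro h
    constructor
    · by_cases hB : (y.length : Int) < r - l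
      · exact Or.inl hB
      · refine Or.inr (fun j hj0 hj1 => ?_)
        have hm := h j hj0 (by omega)
        have := ((ok_merge_char x y l (r + j) _ h0 hfit (by omega) (by omega)).mp hm).2
          (by omega) (by omega)
        simpa [show r + j - l = r - l + j from by ring] using this
    · intro j hj0 hj1
      have hrA : min (x.length : Int) r = r := by omega
      rw [hrA] at hj1 ⊢
      have hm := h j hj0 (by omega)
      exact ((ok_merge_char x y l (r + j) _ h0 hfit (by omega) (by omega)).mp hm).1 (by omega)
  · rintro ⟨hV, hW⟩ j hj0 hj1
    refine (ok_merge_char x y l (r + j) _ h0 hfit (by omega) (by omega)).mpr ⟨?_, ?_⟩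
    · intro hpA
      have hrA : min (x.length : Int) r = r := by omega
      have := hW j hj0 (by rw [hrA]; omega)
      rwa [hrA] at this
    · intro hlp hpy
      rcases hV with hB | hV
      · omega
      · have := hV j hj0 (by omega)
        simpa [show r - l + j = r + j - l from by ring] using this

-- find?-congruence on a list
theorem pv_find?_congr {α : Type} (xs : List α) (p q : α → Bool)
    (h : ∀ a ∈ xs, p a = q a) : xs.find? p = xs.find? q := by
  induction xs with
  | nil => rfl
  | cons a xs ih =>
    have ha := h a (by simp)
    simp only [List.find?_cons, ha]
    cases q a
    · exact ih (fun b hb => h b (by simp [hb]))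
    · rfl

-- a min-fold whose candidates all dominate the accumulator stays put
theorem foldl_min_stay {α : Type} (xs : List α) (P : α → Bool) (f : α → Int) (q : Int)
    (h : ∀ x ∈ xs, q ≤ f x) :
    xs.foldl (fun q r => if P r then min q (f r) else q) q = q := by
  induction xs with
  | nil => rfl
  | cons x xs ih =>
    simp only [List.foldl_cons]
    have hx := h x (by simp)
    by_cases hp : P x
    · simp [hp, min_eq_left hx]
      exact ih (fun y hy => h y (by simp [hy]))
    · simp [hp]
      exact ih (fun y hy => h y (by simp [hy]))

-- on a list along which f is monotone, the min-fold equals the value at the first hit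
theorem foldl_min_find {α : Type} (xs : List α) (P : α → Bool) (f : α → Int) (q : Int)
    (hmono : xs.Pairwise (fun x y => f x ≤ f y)) :
    xs.foldl (fun q r => if P r then min q (f r) else q) q
      = (match xs.find? P with
         | some r => min q (f r)
         | none => q) := by
  induction xs generalizing q with
  | nil => rfl
  | cons x xs ih =>
    rcases List.pairwise_cons.mp hmono with ⟨hx, htl⟩
    by_cases hp : P x
    · rw [List.find?_cons_of_pos hp]
      simp only [List.foldl_cons, hp, if_true]
      exact foldl_min_stay xs P f _ (fun y hy => le_trans (min_le_right _ _) (hx y hy))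
    · rw [List.find?_cons_of_neg hp]
      simp only [List.foldl_cons, hp]
      exact ih _ htl

-- A's Z applied to the selected strings, as a standalone function of the three strings
def pvZcoreA (x y z : List Char) : Int :=
  let A : Int := x.length
  let B : Int := y.length
  let C : Int := z.length
  (PySem.List.pyRange 0 (A + 1) 1).foldl (fun q l =>
    if PySem.List.pyGetD (pvF x y) l false then
      (PySem.List.pyRange l (A + B + 1) 1).foldl (fun q r =>
        if (decide (B < r - l) || PySem.List.pyGetD (pvF y z) (r - l) false)
            && PySem.List.pyGetD (pvF x z) (min A r) false then
          min q (max (max A (l + B)) (r + C))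
        else q) q
    else q) (A + B + C)

-- per-l: A's inner scan over the tables equals B's first-fit search over the merged pattern
theorem inner_eq (x y z : List Char) (l q : Int) (h0 : 0 ≤ l) (hA : l ≤ (x.length : Int)) :
    (if PySem.List.pyGetD (pvF x y) l false then
      (PySem.List.pyRange l ((x.length : Int) + (y.length : Int) + 1) 1).foldl (fun q r =>
        if (decide ((y.length : Int) < r - l) || PySem.List.pyGetD (pvF y z) (r - l) false)
            && PySem.List.pyGetD (pvF x z) (min (x.length : Int) r) false then
          min q (max (max (x.length : Int) (l + (y.length : Int))) (r + (z.length : Int)))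
        else q) q
    else q)
    = (if pvFits x y l then
        match (PySem.List.pyRange l (((pvMerge x y l).length : Int) + 1) 1).find?
            (fun r => pvFits (pvMerge x y l) z r) with
        | some r => min q (max ((pvMerge x y l).length : Int) (r + (z.length : Int)))
        | none => q
      else q) := by
  rw [table_eq x y l h0 hA]
  by_cases hfit : pvFits x y l = true
  · simp only [hfit, if_true]
    have hM : ((pvMerge x y l).length : Int)
        = max (x.length : Int) (l + (y.length : Int)) := merge_len x y l
    simp only [hM]
    rw [foldl_min_find _ _ _ _
      ((PySem.List.pairwise_lt_pyRange_one _ _).imp (fun hlt => by omega))]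
    rw [PySem.List.pyRange_one_append l (max (x.length : Int) (l + (y.length : Int)) + 1)
      ((x.length : Int) + (y.length : Int) + 1) (by omega) (by omega)]
    rw [List.find?_append]
    have hcongr : (PySem.List.pyRange l (max (x.length : Int) (l + (y.length : Int)) + 1) 1).find?
          (fun r => (decide ((y.length : Int) < r - l)
              || PySem.List.pyGetD (pvF y z) (r - l) false)
            && PySem.List.pyGetD (pvF x z) (min (x.length : Int) r) false)
        = (PySem.List.pyRange l (max (x.length : Int) (l + (y.length : Int)) + 1) 1).find?
          (fun r => pvFits (pvMerge x y l) z r) := by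
      apply pv_find?_congr
      intro r hr
      rw [PySem.List.mem_pyRange_one] at hr
      rw [fits_merge x y z l r h0 hfit hr.1]
      rw [table_eq x z (min (x.length : Int) r) (by omega) (by omega)]
      by_cases hB : (y.length : Int) < r - l
      · simp [hB]
      · rw [table_eq y z (r - l) (by omega) (by omega)]
    rw [hcongr]
    have hsome : (PySem.List.pyRange l (max (x.length : Int) (l + (y.length : Int)) + 1) 1).find?
        (fun r => pvFits (pvMerge x y l) z r) ≠ none := by
      intro hnone
      have hmem : (max (x.length : Int) (l + (y.length : Int)))
          ∈ PySem.List.pyRange l (max (x.length : Int) (l + (y.length : Int)) + 1) 1 :=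
        PySem.List.mem_pyRange_one.mpr ⟨by omega, by omega⟩
      have hfitM : pvFits (pvMerge x y l) z (max (x.length : Int) (l + (y.length : Int))) = true := by
        refine (fits_iff _ _ _).mpr (fun j hj0 hj1 => ?_)
        rw [hM] at hj1
        omega
      have := List.find?_eq_none.mp hnone _ hmem
      exact this hfitM
    rcases hfnd : (PySem.List.pyRange l (max (x.length : Int) (l + (y.length : Int)) + 1) 1).find?
        (fun r => pvFits (pvMerge x y l) z r) with _ | r0
    · exact absurd hfnd hsome
    · simp
  · simp only [Bool.not_eq_true] at hfit
    simp [hfit]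

-- A's double scan equals B's merge-based best
theorem pvZcoreA_eq (x y z : List Char) : pvZcoreA x y z = pvBest x y z := by
  unfold pvZcoreA pvBest
  apply PySem.List.foldl_congr_mem
  intro q l hl
  rw [PySem.List.mem_pyRange_one] at hl
  exact inner_eq x y z l q hl.1 (by omega)

theorem find_minimum_length_of_s_eq (a b c : String) :
    find_minimum_length_of_s a b c = find_minimum_length_of_s_alt a b c := by
  have e1 : find_minimum_length_of_s a b c =
      (match PySem.List.min?
          [pvZcoreA a.toList b.toList c.toList, pvZcoreA a.toList c.toList b.toList,
           pvZcoreA b.toList a.toList c.toList, pvZcoreA b.toList c.toList a.toList,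
           pvZcoreA c.toList a.toList b.toList, pvZcoreA c.toList b.toList a.toList]
          (fun v => v) with
       | some v => v
       | none => 0) := rfl
  rw [e1, PySem.List.min?_id_cons]
  simp only [List.foldl, pvZcoreA_eq]
  rfl

-- ===== VERDICT (by name: the statement is the Claim_ definition above) =====
theorem find_minimum_length_of_s_spec : Claim_equal_find_minimum_length_of_s := by
  intro a b c _
  unfold Spec_find_minimum_length_of_s
  exact find_minimum_length_of_s_eq a b c
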